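-- pv_equiv track=rewrite | github.com/Tobias-deWerk/PairWiseAlignmentViz | core/genome_workflow.py | _map_local_ranges_to_columns
-- ===== SOURCE A (Python) =====
-- from typing import BinaryIO, Dict, List, Optional, Sequence, Tuple
--
-- def _map_local_ranges_to_columns(aligned_query: str, local_ranges: Sequence[Tuple[int, int]]) -> List[Tuple[int, int]]:
--     result: List[Tuple[int, int]] = []
--     if not local_ranges:
--         return result
--
--     current_local = 0
--     interval_index = 0
--     interval_start_col: Optional[int] = None
--     sorted_ranges = sorted(local_ranges, key=lambda pair: pair[0])
--
--     for col, base in enumerate(aligned_query, start=1):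
--         if base != "-":
--             current_local += 1
--
--         if interval_index >= len(sorted_ranges):
--             break
--         start_local, end_local = sorted_ranges[interval_index]
--
--         if current_local >= start_local and current_local <= end_local and base != "-":
--             if interval_start_col is None:
--                 interval_start_col = col
--
--         if current_local > end_local:
--             if interval_start_col is not None:
--                 result.append((interval_start_col, col - 1))
--             interval_start_col = None
--             interval_index += 1
--             while interval_index < len(sorted_ranges) and sorted_ranges[interval_index][1] < current_local:
--                 interval_index += 1
--             if interval_index < len(sorted_ranges):
--                 start_local, end_local = sorted_ranges[interval_index]
--                 if current_local >= start_local and current_local <= end_local and base != "-":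
--                     interval_start_col = col
--
--     if interval_start_col is not None and interval_index < len(sorted_ranges):
--         result.append((interval_start_col, len(aligned_query)))
--     return result
-- ===== SOURCE B (Python) =====
-- def _map_local_ranges_to_columns(aligned_query, local_ranges):
--     # column (1-indexed) of each non-gap base: col_of[p-1] is base p's column
--     col_of = [col for col, base in enumerate(aligned_query, start=1) if base != "-"]
--     n = len(col_of)
--     result = []
--     c = 1  # lowest local base position not yet consumed by an emitted span
--     for s, e in sorted(local_ranges, key=lambda pair: pair[0]):
--         if e < c:
--             continue  # range lies entirely in the already-consumed prefix
--         p = max(s, c)  # first base the span actually covers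
--         if e >= n:
--             # range runs past the last base: the span extends to the end of the
--             # alignment, and later ranges start no earlier, so nothing follows
--             if p <= n:
--                 result.append((col_of[p - 1], len(aligned_query)))
--             break
--         if p <= e:
--             result.append((col_of[p - 1], col_of[e] - 1))
--         c = e + 1
--     return result
-- ===== Notes on version B (the rewrite author's own statement) =====
-- stated objective: alternative
-- what changed: A fuses everything into one column-by-column scan with interval bookkeeping; B first builds a base-to-column index table (col_of) in one pass and then walks the sorted ranges, computing each emitted span directly from the table.
import Mathlib
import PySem

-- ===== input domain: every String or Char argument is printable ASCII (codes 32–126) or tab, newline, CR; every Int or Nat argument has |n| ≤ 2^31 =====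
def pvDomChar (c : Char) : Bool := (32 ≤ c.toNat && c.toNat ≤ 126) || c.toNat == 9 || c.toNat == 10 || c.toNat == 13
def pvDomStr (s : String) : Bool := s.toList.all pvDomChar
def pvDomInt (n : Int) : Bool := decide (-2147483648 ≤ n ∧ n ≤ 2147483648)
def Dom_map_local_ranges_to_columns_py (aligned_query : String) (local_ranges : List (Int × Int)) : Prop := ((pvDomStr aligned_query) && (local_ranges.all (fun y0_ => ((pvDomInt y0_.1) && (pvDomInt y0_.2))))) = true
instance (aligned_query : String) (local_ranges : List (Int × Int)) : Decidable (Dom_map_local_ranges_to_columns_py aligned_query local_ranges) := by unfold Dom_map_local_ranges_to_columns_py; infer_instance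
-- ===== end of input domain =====

-- B replaces A's fused column scan with a precomputed base→column index table plus a
-- single walk over the sorted ranges (objective: alternative decomposition, not faster).

-- ===== PORT A =====
-- the inner `while interval_index < len(...) and sorted_ranges[interval_index][1] < current_local` loop
def skipIdx (rs : List (Int × Int)) (cur : Int) (idx : Nat) : Nat :=
  if h : idx < rs.length ∧ (rs.getD idx (0, 0)).2 < cur then skipIdx rs cur (idx + 1) else idx
termination_by rs.length - idx
decreasing_by omega

-- the `for col, base in enumerate(aligned_query, start=1)` loop; state = (result, current_local, interval_index, interval_start_col)
def aLoop (rs : List (Int × Int)) : List (Int × Char) → List (Int × Int) × Int × Nat × Option Int → List (Int × Int) × Int × Nat × Option Int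
  | [], st => st
  | (col, base) :: rest, (res, cur0, idx, st0) =>
    let cur := if base ≠ '-' then cur0 + 1 else cur0
    if rs.length ≤ idx then (res, cur, idx, st0)          -- break
    else
      let se := rs.getD idx (0, 0)
      let st1 := if se.1 ≤ cur ∧ cur ≤ se.2 ∧ base ≠ '-' then (if st0 = none then some col else st0) else st0
      if se.2 < cur then
        let res1 := match st1 with
          | some a => res ++ [(a, col - 1)]
          | none => res
        let idx1 := skipIdx rs cur (idx + 1)
        let st2 : Option Int :=
          if idx1 < rs.length then
            let se1 := rs.getD idx1 (0, 0)
            if se1.1 ≤ cur ∧ cur ≤ se1.2 ∧ base ≠ '-' then some col else none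
          else none
        aLoop rs rest (res1, cur, idx1, st2)
      else aLoop rs rest (res, cur, idx, st1)

def map_local_ranges_to_columns_py (aligned_query : String) (local_ranges : List (Int × Int)) : List (Int × Int) :=
  if local_ranges = [] then []
  else
    let rs := PySem.List.sorted local_ranges (fun pair => pair.1) false
    match aLoop rs (PySem.List.enumerate aligned_query.toList 1) ([], 0, 0, none) with
    | (res, _, idx, st) =>
      match st with
      | some a => if idx < rs.length then res ++ [(a, (aligned_query.toList.length : Int))] else res
      | none => res

-- ===== PORT B =====
-- col_of: 1-indexed alignment column of each non-gap base
def bColOf (l : List Char) : List Int :=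
  (PySem.List.enumerate l 1).filterMap (fun cb => if cb.2 ≠ '-' then some cb.1 else none)

-- the `for s, e in sorted(...)` loop of Source B; c = lowest unconsumed local base position
def bLoop (colOf : List Int) (n L : Int) : List (Int × Int) → Int → List (Int × Int)
  | [], _ => []
  | (s, e) :: rest, c =>
    if e < c then bLoop colOf n L rest c
    else
      let p := max s c
      if n ≤ e then
        if p ≤ n then [(PySem.List.pyGetD colOf (p - 1) 0, L)] else []
      else
        (if p ≤ e then [(PySem.List.pyGetD colOf (p - 1) 0, PySem.List.pyGetD colOf e 0 - 1)] else [])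
          ++ bLoop colOf n L rest (e + 1)

def map_local_ranges_to_columns_py_alt (aligned_query : String) (local_ranges : List (Int × Int)) : List (Int × Int) :=
  let colOf := bColOf aligned_query.toList
  bLoop colOf (colOf.length : Int) (aligned_query.toList.length : Int)
    (PySem.List.sorted local_ranges (fun pair => pair.1) false) 1

-- ===== PRECONDITION & SPEC =====
def Spec_map_local_ranges_to_columns_py (aligned_query : String) (local_ranges : List (Int × Int)) (out : List (Int × Int)) : Prop := out = map_local_ranges_to_columns_py_alt aligned_query local_ranges
instance (aligned_query : String) (local_ranges : List (Int × Int)) (out : List (Int × Int)) : Decidable (Spec_map_local_ranges_to_columns_py aligned_query local_ranges out) := by unfold Spec_map_local_ranges_to_columns_py; infer_instance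

-- ===== CLAIM (what is proved, stated in full; the proofs are below) =====
def Claim_equal_map_local_ranges_to_columns_py : Prop := ∀ (aligned_query : String) (local_ranges : List (Int × Int)), Dom_map_local_ranges_to_columns_py aligned_query local_ranges → Spec_map_local_ranges_to_columns_py aligned_query local_ranges (map_local_ranges_to_columns_py aligned_query local_ranges)

-- ===== LEMMAS AND PROOFS =====

-- columns (numbered from k) of the non-gap characters of l
def colsFrom : Int → List Char → List Int
  | _, [] => []
  | k, ch :: t => if ch ≠ '-' then k :: colsFrom (k + 1) t else colsFrom (k + 1) t

-- list-suffix reformulation of A's loop (ranges carried as a suffix list, column counter explicit)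
def aLoopL : List Char → Int → List (Int × Int) × Int × List (Int × Int) × Option Int → List (Int × Int) × Int × List (Int × Int) × Option Int
  | [], _, st => st
  | ch :: t, k, (res, cur0, rsuf, st0) =>
    let cur := if ch ≠ '-' then cur0 + 1 else cur0
    match rsuf with
    | [] => (res, cur, [], st0)
    | (s, e) :: rt =>
      let st1 := if s ≤ cur ∧ cur ≤ e ∧ ch ≠ '-' then (if st0 = none then some k else st0) else st0
      if e < cur then
        let res1 := match st1 with | some a => res ++ [(a, k - 1)] | none => res
        let rsuf1 := rt.dropWhile (fun r => r.2 < cur)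
        let st2 : Option Int := match rsuf1 with
          | (s1, e1) :: _ => if s1 ≤ cur ∧ cur ≤ e1 ∧ ch ≠ '-' then some k else none
          | [] => none
        aLoopL t (k + 1) (res1, cur, rsuf1, st2)
      else aLoopL t (k + 1) (res, cur, rsuf, st1)

-- A's trailing append, on the list-suffix state
def aFinL (L : Int) : List (Int × Int) × Int × List (Int × Int) × Option Int → List (Int × Int)
  | (res, _, rsuf, st) =>
    match st with
    | some a => if rsuf ≠ [] then res ++ [(a, L)] else res
    | none => res

lemma skipIdx_drop (rs : List (Int × Int)) (cur : Int) :
    ∀ idx, idx ≤ rs.length →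
      skipIdx rs cur idx ≤ rs.length ∧
      rs.drop (skipIdx rs cur idx) = (rs.drop idx).dropWhile (fun r => r.2 < cur) := by
  suffices H : ∀ (n idx : Nat), rs.length - idx = n → idx ≤ rs.length →
      skipIdx rs cur idx ≤ rs.length ∧
      rs.drop (skipIdx rs cur idx) = (rs.drop idx).dropWhile (fun r => r.2 < cur) by
    intro idx h; exact H _ idx rfl h
  intro n
  induction n using Nat.strong_induction_on with
  | _ n ih =>
    intro idx hn hle
    rw [skipIdx]
    split
    · rename_i h
      have hlt : idx < rs.length := h.1
      have hdrop : rs.drop idx = rs.getD idx (0, 0) :: rs.drop (idx + 1) := by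
        rw [List.getD_eq_getElem rs (0,0) hlt]
        exact List.drop_eq_getElem_cons hlt
      have := ih (rs.length - (idx + 1)) (by omega) (idx + 1) rfl (by omega)
      refine ⟨this.1, ?_⟩
      rw [this.2, hdrop, List.dropWhile_cons, if_pos (by simpa using h.2)]
    · rename_i h
      refine ⟨hle, ?_⟩
      rcases Nat.lt_or_ge idx rs.length with hlt | hge
      · have hdrop : rs.drop idx = rs.getD idx (0, 0) :: rs.drop (idx + 1) := by
          rw [List.getD_eq_getElem rs (0,0) hlt]
          exact List.drop_eq_getElem_cons hlt
        have hp : ¬ (rs.getD idx (0, 0)).2 < cur := fun hc => h ⟨hlt, hc⟩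
        rw [hdrop, List.dropWhile_cons, if_neg (by simpa using hp)]
      · have : rs.drop idx = [] := List.drop_eq_nil_of_le hge
        simp [this]

lemma bridgeA (rs : List (Int × Int)) :
    ∀ (l : List Char) (k : Int) (res : List (Int × Int)) (cur : Int) (idx : Nat) (st : Option Int),
      idx ≤ rs.length →
      (aLoop rs (PySem.List.enumerate l k) (res, cur, idx, st)).1 = (aLoopL l k (res, cur, rs.drop idx, st)).1 ∧
      (aLoop rs (PySem.List.enumerate l k) (res, cur, idx, st)).2.2.2 = (aLoopL l k (res, cur, rs.drop idx, st)).2.2.2 ∧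
      rs.drop (aLoop rs (PySem.List.enumerate l k) (res, cur, idx, st)).2.2.1 = (aLoopL l k (res, cur, rs.drop idx, st)).2.2.1 ∧
      (aLoop rs (PySem.List.enumerate l k) (res, cur, idx, st)).2.2.1 ≤ rs.length := by
  intro l
  induction l with
  | nil =>
    intro k res cur idx st hle
    rw [PySem.List.enumerate_nil]
    simp [aLoop, aLoopL, hle]
  | cons ch t ih =>
    intro k res cur idx st hle
    rw [PySem.List.enumerate_cons]
    rcases Nat.lt_or_ge idx rs.length with hlt | hge
    · have hdrop : rs.drop idx = rs.getD idx (0, 0) :: rs.drop (idx + 1) := by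
        rw [List.getD_eq_getElem rs (0,0) hlt]
        exact List.drop_eq_getElem_cons hlt
      rw [hdrop]
      show (aLoop rs ((k, ch) :: PySem.List.enumerate t (k+1)) (res, cur, idx, st)).1 = _ ∧ _
      simp only [aLoop, aLoopL]
      rw [if_neg (by omega)]
      set cur' := if ch ≠ '-' then cur + 1 else cur with hcur'
      set se := rs.getD idx (0, 0) with hse
      set st1 := if se.1 ≤ cur' ∧ cur' ≤ se.2 ∧ ch ≠ '-' then (if st = none then some k else st) else st with hst1
      by_cases hem : se.2 < cur'
      · rw [if_pos hem, if_pos hem]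
        obtain ⟨hsk1, hsk2⟩ := skipIdx_drop rs cur' (idx + 1) (by omega)
        have hhead : (if skipIdx rs cur' (idx + 1) < rs.length then
              (if (rs.getD (skipIdx rs cur' (idx+1)) (0,0)).1 ≤ cur' ∧ cur' ≤ (rs.getD (skipIdx rs cur' (idx+1)) (0,0)).2 ∧ ch ≠ '-' then some k else none)
            else none)
            = (match rs.drop (skipIdx rs cur' (idx + 1)) with
               | (s1, e1) :: _ => if s1 ≤ cur' ∧ cur' ≤ e1 ∧ ch ≠ '-' then some k else none
               | [] => none) := by
          rcases Nat.lt_or_ge (skipIdx rs cur' (idx + 1)) rs.length with h2 | h2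
          · have hd2 : rs.drop (skipIdx rs cur' (idx+1)) = rs.getD (skipIdx rs cur' (idx+1)) (0,0) :: rs.drop (skipIdx rs cur' (idx+1) + 1) := by
              rw [List.getD_eq_getElem rs (0,0) h2]
              exact List.drop_eq_getElem_cons h2
            rw [hd2, if_pos h2]
          · have hd2 : rs.drop (skipIdx rs cur' (idx+1)) = [] := List.drop_eq_nil_of_le h2
            rw [hd2, if_neg (by omega)]
        rw [← hsk2, ← hhead]
        exact ih (k+1) _ cur' (skipIdx rs cur' (idx + 1)) _ hsk1
      · rw [if_neg hem, if_neg hem, ← hdrop]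
        exact ih (k+1) res cur' idx st1 (by omega)
    · have hdrop : rs.drop idx = [] := List.drop_eq_nil_of_le hge
      rw [hdrop]
      show (aLoop rs ((k, ch) :: PySem.List.enumerate t (k+1)) (res, cur, idx, st)).1 = _ ∧ _
      simp only [aLoop, aLoopL]
      rw [if_pos (by omega)]
      exact ⟨rfl, rfl, hdrop, hle⟩

lemma bColOf_eq (l : List Char) : bColOf l = colsFrom 1 l := by
  suffices H : ∀ (l : List Char) (k : Int),
      (PySem.List.enumerate l k).filterMap (fun cb => if cb.2 ≠ '-' then some cb.1 else none) = colsFrom k l by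
    exact H l 1
  intro l
  induction l with
  | nil => intro k; simp [PySem.List.enumerate_nil, colsFrom]
  | cons ch t ih =>
    intro k
    rw [PySem.List.enumerate_cons]
    by_cases h : ch ≠ '-'
    · rw [List.filterMap_cons_some (b := k) (h := by simp [h]), ih, colsFrom, if_pos h]
    · rw [List.filterMap_cons_none (h := by simp [show ch = '-' by simpa using h]), ih, colsFrom, if_neg h]

-- dropping ranges whose end is below a threshold already skipped by bLoop changes nothing
lemma bLoop_dropWhile (colOf : List Int) (n L m : Int) :
    ∀ (rs : List (Int × Int)) (c : Int), m ≤ c →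
      bLoop colOf n L (rs.dropWhile (fun r => r.2 < m)) c = bLoop colOf n L rs c := by
  intro rs
  induction rs with
  | nil => intro c _; rfl
  | cons r rt ih =>
    intro c hmc
    rcases r with ⟨s, e⟩
    rw [List.dropWhile_cons]
    by_cases hd : e < m
    · rw [if_pos (by simpa using hd), ih c hmc]
      rw [show bLoop colOf n L ((s, e) :: rt) c = bLoop colOf n L rt c by
        rw [bLoop, if_pos (by omega)]]
    · rw [if_neg (by simpa using hd)]

-- with no bases at all, bLoop emits nothing (c stays ≥ 1 > n = 0)
lemma bLoop_n_zero (colOf : List Int) (L : Int) :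
    ∀ (rs : List (Int × Int)) (c : Int), 1 ≤ c → bLoop colOf 0 L rs c = [] := by
  intro rs
  induction rs with
  | nil => intro c _; rfl
  | cons r rt ih =>
    intro c hc
    rcases r with ⟨s, e⟩
    rw [bLoop]
    split
    · exact ih c hc
    · rename_i he
      rw [if_pos (show (0:Int) ≤ e by omega), if_neg (show ¬ max s c ≤ (0:Int) by omega)]

lemma dropWhile_head_false {α : Type} (p : α → Bool) :
    ∀ (l : List α) (x : α) (xs : List α), l.dropWhile p = x :: xs → p x = false := by
  intro l
  induction l with
  | nil => intro x xs h; simp at h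
  | cons a t ih =>
    intro x xs h
    rw [List.dropWhile_cons] at h
    split at h
    · exact ih x xs h
    · rename_i hp
      obtain ⟨rfl, rfl⟩ := List.cons.inj h
      simpa using hp

lemma getD_mid (pre : List Int) (k : Int) (rest : List Int) (d : Int) :
    (pre ++ k :: rest).getD pre.length d = k := by
  induction pre with
  | nil => rfl
  | cons a t ih => simp only [List.cons_append, List.length_cons, List.getD_cons_succ]; exact ih

lemma main_lemma :
    ∀ (l : List Char) (k cur cB : Int) (pre colOf : List Int) (rsuf : List (Int × Int))
      (st : Option Int) (res : List (Int × Int)) (L n : Int),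
      1 ≤ k → 0 ≤ cur →
      colOf = pre ++ colsFrom k l → (pre.length : Int) = cur →
      n = (colOf.length : Int) → L = k - 1 + l.length →
      (rsuf = [] ∨
        (∃ s e rt, rsuf = (s, e) :: rt ∧
          ((cur ≤ e ∧ 1 ≤ cB ∧ cB ≤ max cur 1 ∧ cB ≤ e ∧
             st = (if max s cB ≤ cur then some (PySem.List.pyGetD colOf (max s cB - 1) 0) else none)) ∨
           (cur = 0 ∧ cB = 1 ∧ e < 1 ∧ st = none)))) →
      aFinL L (aLoopL l k (res, cur, rsuf, st)) = res ++ bLoop colOf n L rsuf cB := by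
  intro l
  induction l with
  | nil =>
    intro k cur cB pre colOf rsuf st res L n hk hcur0 hcolOf hpre hn hL hrs
    have hcol : colOf = pre := by rw [hcolOf, colsFrom]; simp
    have hncur : n = cur := by rw [hn, hcol, ← hpre]
    rcases hrs with hrs | ⟨s, e, rt, hrsuf, hcase⟩
    · subst hrs; cases st <;> simp [aLoopL, aFinL, bLoop]
    · subst hrsuf
      rcases hcase with ⟨hce, hcB1, hcBc, hcBe, hst⟩ | ⟨hc0, hcB1, he, hst⟩
      · subst hst
        simp only [aLoopL, bLoop]
        rw [if_neg (show ¬ e < cB by omega), if_pos (show n ≤ e by omega)]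
        by_cases hp : max s cB ≤ cur
        · rw [if_pos hp, if_pos (show max s cB ≤ n by omega)]
          simp [aFinL]
        · rw [if_neg hp, if_neg (show ¬ max s cB ≤ n by omega)]
          simp [aFinL]
      · subst hst
        have hn0 : n = 0 := by omega
        rw [hn0, bLoop_n_zero colOf L _ cB (by omega)]
        simp [aLoopL, aFinL]
  | cons ch t ih =>
    intro k cur cB pre colOf rsuf st res L n hk hcur0 hcolOf hpre hn hL hrs
    rcases hrs with hrs | ⟨s, e, rt, hrsuf, hcase⟩
    · subst hrs; cases st <;> simp [aLoopL, aFinL, bLoop]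
    · subst hrsuf
      have hLt : L = (k + 1) - 1 + (t.length : Int) := by
        rw [hL]; simp only [List.length_cons]; push_cast; ring
      by_cases hch : ch = '-'
      -- ===== gap column =====
      · subst hch
        have hcolOf' : colOf = pre ++ colsFrom (k + 1) t := by
          rw [hcolOf, colsFrom]; simp
        rcases hcase with ⟨hce, hcB1, hcBc, hcBe, hst⟩ | ⟨hc0, hcB1, he, hst⟩
        · -- (i): no disposal (cur ≤ e), state unchanged
          have hstep : aLoopL ('-' :: t) k (res, cur, (s, e) :: rt, st) =
              aLoopL t (k + 1) (res, cur, (s, e) :: rt, st) := by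
            simp only [aLoopL]
            simp [show ¬ e < cur by omega]
          rw [hstep]
          exact ih (k + 1) cur cB pre colOf ((s, e) :: rt) st res L n (by omega) hcur0
            hcolOf' hpre hn hLt
            (Or.inr ⟨s, e, rt, rfl, Or.inl ⟨hce, hcB1, hcBc, hcBe, hst⟩⟩)
        · -- (ii): cur = 0, cB = 1, e < 1, gap column
          subst hst; subst hc0
          by_cases heneg : e < 0
          · -- A disposes of the range at this gap column (threshold 0)
            have hstep : aLoopL ('-' :: t) k (res, 0, (s, e) :: rt, none) =
                aLoopL t (k + 1) (res, 0, rt.dropWhile (fun r => r.2 < (0:Int)), none) := by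
              rcases hrw : rt.dropWhile (fun r => r.2 < (0:Int)) with _ | ⟨⟨s1, e1⟩, rt1⟩ <;>
                · simp only [aLoopL]
                  simp [show e < (0:Int) by omega, hrw]
            rw [hstep]
            -- B side: skip the head (e < 1 = cB), then the dropped ranges are skipped too
            have hBstep : bLoop colOf n L ((s, e) :: rt) cB =
                bLoop colOf n L (rt.dropWhile (fun r => r.2 < (0:Int))) cB := by
              rw [bLoop, if_pos (show e < cB by omega)]
              rw [bLoop_dropWhile colOf n L 0 rt cB (by omega)]
            rw [hBstep]
            refine ih (k + 1) 0 cB pre colOf _ none res L n (by omega) le_rfl hcolOf' hpre hn hLt ?_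
            rcases hrw : rt.dropWhile (fun r => r.2 < (0:Int)) with _ | ⟨⟨s1, e1⟩, rt1⟩
            · exact Or.inl hrw
            · have hhf := dropWhile_head_false _ rt _ _ hrw
              by_cases he1 : e1 < 1
              · exact Or.inr ⟨s1, e1, rt1, hrw, Or.inr ⟨rfl, hcB1, he1, rfl⟩⟩
              · refine Or.inr ⟨s1, e1, rt1, hrw, Or.inl ⟨by simpa using hhf, by omega, by omega, by omega, ?_⟩⟩
                rw [if_neg (by omega)]
          · -- e = 0: A keeps the range and moves on; B's call is unchanged
            have hstep : aLoopL ('-' :: t) k (res, 0, (s, e) :: rt, none) =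
                aLoopL t (k + 1) (res, 0, (s, e) :: rt, none) := by
              simp only [aLoopL]
              simp [show ¬ e < (0:Int) by omega]
            rw [hstep]
            exact ih (k + 1) 0 cB pre colOf ((s, e) :: rt) none res L n (by omega) le_rfl
              hcolOf' hpre hn hLt (Or.inr ⟨s, e, rt, rfl, Or.inr ⟨rfl, hcB1, he, rfl⟩⟩)
      -- ===== non-gap column =====
      · have hcolcons : colOf = pre ++ k :: colsFrom (k + 1) t := by
          rw [hcolOf, colsFrom, if_pos hch]
        have hkey : PySem.List.pyGetD colOf cur 0 = k := by
          rw [hcolcons, ← hpre, PySem.List.pyGetD_natCast]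
          exact getD_mid pre k _ 0
        have hnbig : cur + 1 ≤ n := by
          rw [hn, hcolcons]
          simp only [List.length_append, List.length_cons]
          push_cast
          omega
        rcases hcase with ⟨hce, hcB1, hcBc, hcBe, hst⟩ | ⟨hc0, hcB1, he, hst⟩
        · subst hst
          by_cases hee : e < cur + 1
          · -- emission: cur = e, column k holds base e + 1 — wait, cur = e means this column is base e+1? no: cur+1 > e and cur ≤ e → e = cur; this column is base cur+1, disposal
            have hecur : e = cur := by omega
            have hstep : aLoopL (ch :: t) k (res, cur, (s, e) :: rt,
                (if max s cB ≤ cur then some (PySem.List.pyGetD colOf (max s cB - 1) 0) else none)) =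
                aLoopL t (k + 1)
                  (res ++ (if max s cB ≤ cur then [(PySem.List.pyGetD colOf (max s cB - 1) 0, k - 1)] else []),
                    cur + 1, rt.dropWhile (fun r => r.2 < cur + 1),
                    (match rt.dropWhile (fun r => r.2 < cur + 1) with
                     | (s1, e1) :: _ => if s1 ≤ cur + 1 ∧ cur + 1 ≤ e1 ∧ ch ≠ '-' then some k else none
                     | [] => none)) := by
              simp only [aLoopL]
              simp only [if_pos hch]
              rw [if_neg (show ¬ (s ≤ cur + 1 ∧ cur + 1 ≤ e ∧ ch ≠ '-') by rintro ⟨-, h2, -⟩; omega)]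
              rw [if_pos (show e < cur + 1 by omega)]
              by_cases hp : max s cB ≤ cur
              · rw [if_pos hp, if_pos hp]
              · rw [if_neg hp, if_neg hp]; simp
            rw [hstep]
            have hBstep : bLoop colOf n L ((s, e) :: rt) cB =
                (if max s cB ≤ cur then
                    [(PySem.List.pyGetD colOf (max s cB - 1) 0, k - 1)]
                  else []) ++
                  bLoop colOf n L (rt.dropWhile (fun r => r.2 < cur + 1)) (cur + 1) := by
              rw [bLoop, if_neg (show ¬ e < cB by omega), if_neg (show ¬ n ≤ e by omega), hecur, hkey]
              rw [bLoop_dropWhile colOf n L (cur + 1) rt (cur + 1) le_rfl]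
            rw [hBstep, ← List.append_assoc]
            refine ih (k + 1) (cur + 1) (cur + 1) (pre ++ [k]) colOf _ _ _ L n (by omega)
              (by omega) (by rw [hcolcons]; simp) (by simp; omega) hn hLt ?_
            rcases hrw : rt.dropWhile (fun r => r.2 < cur + 1) with _ | ⟨⟨s1, e1⟩, rt1⟩
            · exact Or.inl hrw
            · have hhf := dropWhile_head_false _ rt _ _ hrw
              refine Or.inr ⟨s1, e1, rt1, hrw, Or.inl ⟨by simpa using hhf, by omega, by omega, by simpa using hhf, ?_⟩⟩
              simp only [hrw]
              by_cases hs1 : s1 ≤ cur + 1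
              · rw [if_pos ⟨hs1, by simpa using hhf, hch⟩, if_pos (by omega)]
                have hm : max s1 (cur + 1) - 1 = cur := by omega
                rw [hm, hkey]
              · rw [if_neg (by rintro ⟨h1, -⟩; omega), if_neg (by omega)]
          · -- no emission: cur + 1 ≤ e, the start may get set at this column
            have hstF :
                (if s ≤ cur + 1 ∧ cur + 1 ≤ e ∧ ch ≠ '-' then
                    (if (if max s cB ≤ cur then some (PySem.List.pyGetD colOf (max s cB - 1) 0) else none) = none
                     then some k
                     else (if max s cB ≤ cur then some (PySem.List.pyGetD colOf (max s cB - 1) 0) else none))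
                  else (if max s cB ≤ cur then some (PySem.List.pyGetD colOf (max s cB - 1) 0) else none)) =
                (if max s cB ≤ cur + 1 then some (PySem.List.pyGetD colOf (max s cB - 1) 0) else none) := by
              by_cases hp : max s cB ≤ cur
              · rw [if_pos hp]
                rw [if_pos (show max s cB ≤ cur + 1 by omega)]
                split <;> simp
              · rw [if_neg hp]
                by_cases hs : s ≤ cur + 1
                · rw [if_pos (show s ≤ cur + 1 ∧ cur + 1 ≤ e ∧ ch ≠ '-' from ⟨hs, by omega, hch⟩)]
                  rw [if_pos (show max s cB ≤ cur + 1 by omega)]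
                  rw [if_pos rfl]
                  have hm : max s cB - 1 = cur := by omega
                  rw [hm, hkey]
                · rw [if_neg (show ¬ (s ≤ cur + 1 ∧ cur + 1 ≤ e ∧ ch ≠ '-') by rintro ⟨h1, -⟩; omega)]
                  rw [if_neg (show ¬ max s cB ≤ cur + 1 by omega)]
            have hstep : aLoopL (ch :: t) k (res, cur, (s, e) :: rt,
                (if max s cB ≤ cur then some (PySem.List.pyGetD colOf (max s cB - 1) 0) else none)) =
                aLoopL t (k + 1) (res, cur + 1, (s, e) :: rt,
                  (if max s cB ≤ cur + 1 then some (PySem.List.pyGetD colOf (max s cB - 1) 0) else none)) := by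
              simp only [aLoopL]
              simp only [if_pos hch]
              rw [if_neg (show ¬ e < cur + 1 from hee), hstF]
            rw [hstep]
            exact ih (k + 1) (cur + 1) cB (pre ++ [k]) colOf ((s, e) :: rt) _ res L n (by omega)
              (by omega) (by rw [hcolcons]; simp) (by simp; omega) hn hLt
              (Or.inr ⟨s, e, rt, rfl, Or.inl ⟨by omega, hcB1, by omega, hcBe, rfl⟩⟩)
        · -- (ii) with a non-gap column: cur = 0, cB = 1, e < 1, disposal at this base column
          subst hst; subst hc0
          have hstep : aLoopL (ch :: t) k (res, 0, (s, e) :: rt, none) =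
              aLoopL t (k + 1) (res, 0 + 1, rt.dropWhile (fun r => r.2 < 0 + 1),
                (match rt.dropWhile (fun r => r.2 < (0:Int) + 1) with
                 | (s1, e1) :: _ => if s1 ≤ 0 + 1 ∧ 0 + 1 ≤ e1 ∧ ch ≠ '-' then some k else none
                 | [] => none)) := by
            simp only [aLoopL]
            simp only [if_pos hch]
            rw [if_neg (show ¬ (s ≤ (0:Int) + 1 ∧ (0:Int) + 1 ≤ e ∧ ch ≠ '-') by rintro ⟨-, h2, -⟩; omega)]
            rw [if_pos (show e < (0:Int) + 1 by omega)]
          rw [hstep]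
          have hBstep : bLoop colOf n L ((s, e) :: rt) cB =
              bLoop colOf n L (rt.dropWhile (fun r => r.2 < (0:Int) + 1)) cB := by
            rw [bLoop, if_pos (show e < cB by omega)]
            rw [bLoop_dropWhile colOf n L (0 + 1) rt cB (by omega)]
          rw [hBstep]
          have hkey0 : PySem.List.pyGetD colOf 0 0 = k := by simpa using hkey
          refine ih (k + 1) (0 + 1) cB (pre ++ [k]) colOf _ _ res L n (by omega) (by omega)
            (by rw [hcolcons]; simp) (by simp only [List.length_append, List.length_cons, List.length_nil]; push_cast; omega) hn hLt ?_
          rcases hrw : rt.dropWhile (fun r => r.2 < (0:Int) + 1) with _ | ⟨⟨s1, e1⟩, rt1⟩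
          · exact Or.inl hrw
          · have hhf := dropWhile_head_false _ rt _ _ hrw
            refine Or.inr ⟨s1, e1, rt1, hrw, Or.inl ⟨by simpa using hhf, by omega, by omega, by simp at hhf; omega, ?_⟩⟩
            simp only [hrw]
            by_cases hs1 : s1 ≤ (0:Int) + 1
            · rw [if_pos ⟨hs1, by simpa using hhf, hch⟩, if_pos (by omega)]
              have hm : max s1 cB - 1 = 0 := by omega
              rw [hm, hkey0]
            · rw [if_neg (by rintro ⟨h1, -⟩; omega), if_neg (by omega)]

-- ===== VERDICT (by name: the statement is the Claim_ definition above) =====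
theorem map_local_ranges_to_columns_py_spec : Claim_equal_map_local_ranges_to_columns_py := by
  intro aq lr _hdom
  unfold Spec_map_local_ranges_to_columns_py map_local_ranges_to_columns_py map_local_ranges_to_columns_py_alt
  by_cases hlr : lr = []
  · subst hlr
    rw [if_pos rfl]
    rw [show PySem.List.sorted ([] : List (Int × Int)) (fun pair => pair.1) false = [] from rfl]
    rw [bLoop]
  · rw [if_neg hlr]
    set rs := PySem.List.sorted lr (fun pair => pair.1) false with hrsdef
    have hcolOf : bColOf aq.toList = [] ++ colsFrom 1 aq.toList := by
      rw [bColOf_eq]; rfl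
    have hdisj : rs = [] ∨
        (∃ s e rt, rs = (s, e) :: rt ∧
          (((0:Int) ≤ e ∧ (1:Int) ≤ 1 ∧ (1:Int) ≤ max 0 1 ∧ (1:Int) ≤ e ∧
             (none : Option Int) = (if max s 1 ≤ (0:Int) then
                some (PySem.List.pyGetD (bColOf aq.toList) (max s 1 - 1) 0) else none)) ∨
           ((0:Int) = 0 ∧ (1:Int) = 1 ∧ e < 1 ∧ (none : Option Int) = none))) := by
      rcases rs with _ | ⟨⟨s, e⟩, rt⟩
      · exact Or.inl rfl
      · by_cases he : (1:Int) ≤ e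
        · exact Or.inr ⟨s, e, rt, rfl, Or.inl ⟨by omega, le_rfl, by omega, he, by rw [if_neg (by omega)]⟩⟩
        · exact Or.inr ⟨s, e, rt, rfl, Or.inr ⟨rfl, rfl, by omega, rfl⟩⟩
    have hmain := main_lemma aq.toList 1 0 1 [] (bColOf aq.toList) rs none []
      ((aq.toList.length : Int)) (((bColOf aq.toList).length : Int))
      le_rfl le_rfl hcolOf (by simp) rfl (by simp) hdisj
    obtain ⟨h1, h2, h3, h4⟩ := bridgeA rs aq.toList 1 [] 0 0 none (Nat.zero_le _)
    rw [List.drop_zero] at h1 h2 h3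
    rcases hT : aLoop rs (PySem.List.enumerate aq.toList 1) ([], 0, 0, none) with ⟨res1, cur1, idx1, st1⟩
    rcases hS : aLoopL aq.toList 1 ([], 0, rs, none) with ⟨res2, cur2, rsuf2, st2⟩
    rw [hT] at h1 h2 h3 h4
    rw [hS] at h1 h2 h3
    simp only at h1 h2 h3 h4
    rw [hS] at hmain
    subst h1
    subst h2
    rw [List.nil_append] at hmain
    rw [← hmain]
    simp only [hT]
    cases st1 with
    | none => rfl
    | some a =>
      simp only [aFinL]
      by_cases hidx : idx1 < rs.length
      · rw [if_pos hidx, if_pos (by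
          intro hnil
          rw [hnil] at h3
          have := List.drop_eq_nil_iff.mp h3
          omega)]
      · rw [if_neg hidx]
        have hnil : rsuf2 = [] := by
          rw [← h3]
          exact List.drop_eq_nil_of_le (by omega)
        rw [if_neg (by simp [hnil])]
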